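-- pv_equiv track=rewrite | github.com/NaolAklilu/A2SV | 2521-distinct-prime-factors-of-product-of-array/2521-distinct-prime-factors-of-product-of-array.py | distinctPrimeFactors
-- ===== SOURCE A (Python) =====
-- from typing import List
--
-- def distinctPrimeFactors(nums: List[int]) -> int:
--     primes = set()
--     for num in nums:
--         d = 2
--         while d*d <= num:
--             while num % d == 0:
--                 primes.add(d)
--                 num //= d
--             d += 1
--
--         if num > 1:
--             primes.add(num)
--
--     return len(primes)
-- ===== SOURCE B (Python) =====
-- from typing import List
--
-- def _smallest_factor(n):
--     d = 2
--     while d * d <= n: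
--         if n % d == 0:
--             return d
--         d += 1
--     return n
--
-- def _prime_factors(n):
--     if n <= 1:
--         return set()
--     p = _smallest_factor(n)
--     return {p} | _prime_factors(n // p)
--
-- def distinctPrimeFactors(nums: List[int]) -> int:
--     primes = set()
--     for num in nums:
--         primes |= _prime_factors(num)
--     return len(primes)
-- ===== Notes on version B (the rewrite author's own statement) =====
-- stated objective: alternative
-- what changed: Replaces A's nested in-place while-loops (mutating num and d) by a recursive decomposition: a smallest_factor helper plus a recursive prime_factors that returns {p} | prime_factors(n // p), with the result sets unioned per element.
import Mathlib
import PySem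

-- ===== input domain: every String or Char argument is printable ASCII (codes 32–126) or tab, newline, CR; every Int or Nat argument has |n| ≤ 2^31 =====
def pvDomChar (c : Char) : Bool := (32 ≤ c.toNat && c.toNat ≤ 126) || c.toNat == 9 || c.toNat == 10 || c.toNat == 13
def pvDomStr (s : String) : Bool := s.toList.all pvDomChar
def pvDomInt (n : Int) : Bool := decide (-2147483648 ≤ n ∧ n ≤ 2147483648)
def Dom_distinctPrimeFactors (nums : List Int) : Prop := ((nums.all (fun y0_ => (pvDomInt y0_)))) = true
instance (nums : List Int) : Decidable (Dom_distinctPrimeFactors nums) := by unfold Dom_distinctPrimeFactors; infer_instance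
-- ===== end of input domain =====

-- B replaces A's nested in-place while-loops by a recursive decomposition (smallest-factor

-- B replaces A's nested in-place while-loops by a recursive decomposition (smallest-factor
-- helper + recursive prime-factor set, unioned per element); objective: alternative structure, not speed.
-- The fuel arguments only bound the loops/recursions (each is provably sufficient, see the
-- *_spec lemmas below); they change no computed value.

-- ===== PORT A =====
-- A's two nested while-loops over the state (num, d, primes), flattened into one structural
-- recursion with the same state, branch order and intermediate values; 3*num.toNat + 2 steps
-- are provably enough fuel (facAF_spec), so the fuel-0 branch is never reached from the port.
def facAF (fuel : Nat) (num d : Int) (acc : PySem.Set Int) : PySem.Set Int :=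
  match fuel with
  | 0 => acc
  | fuel + 1 =>
    if d * d ≤ num then
      if PySem.Int.mod num d = 0 then
        facAF fuel (PySem.Int.floordiv num d) d (PySem.Set.add acc d)
      else
        facAF fuel num (d + 1) acc
    else
      if 1 < num then PySem.Set.add acc num else acc

def distinctPrimeFactors (nums : List Int) : Int :=
  ((nums.foldl (fun primes num => facAF (3 * num.toNat + 2) num 2 primes) PySem.Set.empty).length : Int)

-- ===== PORT B =====
-- Source B's _smallest_factor: trial division from d upward (n.toNat + 1 steps are provably
-- enough fuel, see spfBF_spec; the fuel-0 branch is never reached from pfBF).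
def spfBF (fuel : Nat) (n d : Int) : Int :=
  match fuel with
  | 0 => n
  | fuel + 1 =>
    if d * d ≤ n then
      if PySem.Int.mod n d = 0 then d else spfBF fuel n (d + 1)
    else n

-- Source B's _prime_factors: {p} ∪ _prime_factors(n // p), recursively (n.toNat + 1 recursion
-- steps are provably enough fuel, see pfBF_spec).
def pfBF (fuel : Nat) (n : Int) : PySem.Set Int :=
  match fuel with
  | 0 => PySem.Set.empty
  | fuel + 1 =>
    if n ≤ 1 then PySem.Set.empty
    else
      let p := spfBF (n.toNat + 1) n 2
      PySem.Set.union (PySem.Set.ofList [p]) (pfBF fuel (PySem.Int.floordiv n p))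

def distinctPrimeFactors_alt (nums : List Int) : Int :=
  ((nums.foldl (fun primes num => PySem.Set.union primes (pfBF (num.toNat + 1) num)) PySem.Set.empty).length : Int)

-- ===== PRECONDITION & SPEC =====
def Spec_distinctPrimeFactors (nums : List Int) (out : Int) : Prop := out = distinctPrimeFactors_alt nums
instance (nums : List Int) (out : Int) : Decidable (Spec_distinctPrimeFactors nums out) := by unfold Spec_distinctPrimeFactors; infer_instance

-- ===== CLAIM (what is proved, stated in full; the proofs are below) =====
def Claim_equal_distinctPrimeFactors : Prop := ∀ (nums : List Int), Dom_distinctPrimeFactors nums → Spec_distinctPrimeFactors nums (distinctPrimeFactors nums)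

-- ===== LEMMAS AND PROOFS =====

-- the common normal form: the (Int-cast) list of prime factors of n, with multiplicity
def pfList (n : Int) : List Int :=
  if 1 < n then n.toNat.primeFactorsList.map (fun m => (m : Int)) else []

theorem pfList_natCast (M : Nat) : pfList (M : Int) = M.primeFactorsList.map (fun m => (m : Int)) := by
  unfold pfList
  split
  · simp
  · match M with
    | 0 => simp [Nat.primeFactorsList_zero]
    | 1 => simp [Nat.primeFactorsList_one]
    | (m+2) => omega

theorem pfl_unfold (N : Nat) (h : 2 ≤ N) :
    N.primeFactorsList = N.minFac :: (N / N.minFac).primeFactorsList := by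
  obtain ⟨k, rfl⟩ : ∃ k, N = k + 2 := ⟨N - 2, by omega⟩
  rw [Nat.primeFactorsList]

theorem minFac_of_no_small (N D : Nat) (hN : 2 ≤ N) (hD : 2 ≤ D)
    (inv : ∀ k : Nat, 2 ≤ k → k < D → ¬ k ∣ N) (hdvd : D ∣ N) : N.minFac = D := by
  have h1 := Nat.minFac_dvd N
  have h2 := (Nat.minFac_prime (n := N) (by omega)).two_le
  have h3 := Nat.minFac_le_of_dvd hD hdvd
  by_contra hne
  exact inv N.minFac h2 (by omega) h1

theorem prime_of_no_small_sq (N D : Nat) (hN : 2 ≤ N) (hsq : N < D * D)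
    (inv : ∀ k : Nat, 2 ≤ k → k < D → ¬ k ∣ N) : N.Prime := by
  by_contra hnp
  have h1 := Nat.minFac_sq_le_self (n := N) (by omega) hnp
  have h2 := (Nat.minFac_prime (n := N) (by omega)).two_le
  have h3 := Nat.minFac_dvd N
  have h4 : N.minFac < D := by nlinarith [sq_nonneg N.minFac, sq N.minFac]
  exact inv N.minFac h2 h4 h3

-- A's flattened loop computes: append the (not yet present) prime factors of num to acc.
theorem facAF_spec (fuel : Nat) : ∀ (num d : Int) (acc : PySem.Set Int), 2 ≤ d →
    2 * num.toNat + (num + 1 - d).toNat < fuel →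
    (∀ k : Nat, 2 ≤ k → (k : Int) < d → ¬ (k : Int) ∣ num) →
    facAF fuel num d acc = PySem.Set.update acc (pfList num) := by
  induction fuel with
  | zero => intro num d acc hd hfuel inv; omega
  | succ fuel ih =>
    intro num d acc hd hfuel inv
    show (if d * d ≤ num then
            if PySem.Int.mod num d = 0 then
              facAF fuel (PySem.Int.floordiv num d) d (PySem.Set.add acc d)
            else facAF fuel num (d + 1) acc
          else if 1 < num then PySem.Set.add acc num else acc)
        = PySem.Set.update acc (pfList num)
    by_cases h : d * d ≤ num
    · rw [if_pos h]
      have hnum4 : 4 ≤ num := by nlinarith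
      have hNd : ((num.toNat : Int)) = num := Int.toNat_of_nonneg (by omega)
      have hDd : ((d.toNat : Int)) = d := Int.toNat_of_nonneg (by omega)
      by_cases hmod : PySem.Int.mod num d = 0
      · rw [if_pos hmod]
        have hdvd : d ∣ num := (PySem.Int.mod_eq_zero_iff_dvd num d).mp hmod
        have hdvdN : d.toNat ∣ num.toNat := by
          rw [← Int.natCast_dvd_natCast, hNd, hDd]; exact hdvd
        have hinvN : ∀ k : Nat, 2 ≤ k → k < d.toNat → ¬ k ∣ num.toNat := by
          intro k hk hkd hkdvd
          exact inv k hk (by omega) (by rw [← hNd] at *; exact_mod_cast hkdvd)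
        have hmf : num.toNat.minFac = d.toNat :=
          minFac_of_no_small num.toNat d.toNat (by omega) (by omega) hinvN hdvdN
        have hfd : PySem.Int.floordiv num d = ((num.toNat / d.toNat : Nat) : Int) := by
          rw [PySem.Int.floordiv_eq_ediv_of_pos (by omega), ← hNd, ← hDd]
          exact_mod_cast (Int.natCast_div num.toNat d.toNat).symm
        have hpfl : pfList num = d :: pfList (PySem.Int.floordiv num d) := by
          rw [hfd, pfList_natCast]
          unfold pfList
          rw [if_pos (by omega), pfl_unfold num.toNat (by omega), hmf]
          simp [hDd]
        rw [hpfl, PySem.Set.update_cons]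
        apply ih
        · exact hd
        · -- fuel bound for the divided state
          rw [hfd]
          have hDle : d ≤ num := by nlinarith
          have hq2 : num.toNat / d.toNat ≤ num.toNat / 2 := Nat.div_le_div_left (by omega) (by omega)
          have hq1 : 1 ≤ num.toNat / d.toNat := (Nat.one_le_div_iff (by omega)).mpr (by omega)
          generalize hq : num.toNat / d.toNat = q at hq2 hq1
          simp only [Int.toNat_natCast]
          omega
        · intro k hk hkd hkdvd
          have hdvd2 : PySem.Int.floordiv num d ∣ num := by
            rw [hfd, ← hNd]
            exact_mod_cast Nat.div_dvd_of_dvd hdvdN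
          exact inv k hk hkd (hkdvd.trans hdvd2)
      · rw [if_neg hmod]
        apply ih
        · omega
        · have : d ≤ num := by nlinarith
          omega
        · intro k hk hkd hkdvd
          by_cases hkeq : (k : Int) = d
          · rw [hkeq] at hkdvd
            exact hmod ((PySem.Int.mod_eq_zero_iff_dvd num d).mpr hkdvd)
          · exact inv k hk (by omega) hkdvd
    · rw [if_neg h]
      by_cases hgt : 1 < num
      · rw [if_pos hgt]
        have hNd : ((num.toNat : Int)) = num := Int.toNat_of_nonneg (by omega)
        have hinvN : ∀ k : Nat, 2 ≤ k → k < d.toNat → ¬ k ∣ num.toNat := by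
          intro k hk hkd hkdvd
          exact inv k hk (by omega) (by rw [← hNd] at *; exact_mod_cast hkdvd)
        have hp : num.toNat.Prime := by
          apply prime_of_no_small_sq num.toNat d.toNat (by omega) _ hinvN
          have h2 : ((num.toNat : Int)) < ((d.toNat : Int)) * ((d.toNat : Int)) := by
            rw [hNd, Int.toNat_of_nonneg (a := d) (by omega)]; omega
          exact_mod_cast h2
        have hpfl : pfList num = [num] := by
          unfold pfList
          rw [if_pos (by omega), Nat.primeFactorsList_prime hp]
          simp [hNd]
        rw [hpfl, PySem.Set.update_cons, PySem.Set.update_nil]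
      · rw [if_neg hgt]
        have hpfl : pfList num = [] := by unfold pfList; rw [if_neg (by omega)]
        rw [hpfl, PySem.Set.update_nil]

theorem spfBF_spec (fuel : Nat) : ∀ (n d : Int), 2 ≤ d → 2 ≤ n →
    (n + 1 - d).toNat < fuel →
    (∀ k : Nat, 2 ≤ k → (k : Int) < d → ¬ (k : Int) ∣ n) →
    spfBF fuel n d = ((n.toNat.minFac : Nat) : Int) := by
  induction fuel with
  | zero => intro n d hd hn hfuel inv; omega
  | succ fuel ih =>
    intro n d hd hn hfuel inv
    show (if d * d ≤ n then
            if PySem.Int.mod n d = 0 then d else spfBF fuel n (d + 1)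
          else n) = ((n.toNat.minFac : Nat) : Int)
    have hNd : ((n.toNat : Int)) = n := Int.toNat_of_nonneg (by omega)
    have hinvN : ∀ k : Nat, 2 ≤ k → k < d.toNat → ¬ k ∣ n.toNat := by
      intro k hk hkd hkdvd
      exact inv k hk (by omega) (by rw [← hNd] at *; exact_mod_cast hkdvd)
    by_cases h : d * d ≤ n
    · rw [if_pos h]
      by_cases hmod : PySem.Int.mod n d = 0
      · rw [if_pos hmod]
        have hdvd : d ∣ n := (PySem.Int.mod_eq_zero_iff_dvd n d).mp hmod
        have hDd : ((d.toNat : Int)) = d := Int.toNat_of_nonneg (by omega)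
        have hdvdN : d.toNat ∣ n.toNat := by
          rw [← Int.natCast_dvd_natCast, hNd, hDd]; exact hdvd
        rw [minFac_of_no_small n.toNat d.toNat (by omega) (by omega) hinvN hdvdN, hDd]
      · rw [if_neg hmod]
        apply ih
        · omega
        · exact hn
        · have : d ≤ n := by nlinarith
          omega
        · intro k hk hkd hkdvd
          by_cases hkeq : (k : Int) = d
          · rw [hkeq] at hkdvd
            exact hmod ((PySem.Int.mod_eq_zero_iff_dvd n d).mpr hkdvd)
          · exact inv k hk (by omega) hkdvd
    · rw [if_neg h]
      have hp : n.toNat.Prime := by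
        apply prime_of_no_small_sq n.toNat d.toNat (by omega) _ hinvN
        have h2 : ((n.toNat : Int)) < ((d.toNat : Int)) * ((d.toNat : Int)) := by
          rw [hNd, Int.toNat_of_nonneg (a := d) (by omega)]; omega
        exact_mod_cast h2
      rw [hp.minFac_eq, hNd]

theorem ofList_cons_eq_update (p : Int) (l : List Int) :
    PySem.Set.ofList (p :: l) = PySem.Set.update [p] l := rfl

theorem update_ofList (s : PySem.Set Int) (l : List Int) :
    PySem.Set.update s (PySem.Set.ofList l) = PySem.Set.update s l := by
  rw [PySem.Set.update_eq_append_filter, PySem.Set.update_eq_append_filter, PySem.Set.ofList_ofList]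

theorem pfBF_spec (fuel : Nat) : ∀ n : Int, n.toNat < fuel →
    pfBF fuel n = PySem.Set.ofList (pfList n) := by
  induction fuel with
  | zero => intro n hfuel; omega
  | succ fuel ih =>
    intro n hfuel
    show (if n ≤ 1 then PySem.Set.empty
          else
            let p := spfBF (n.toNat + 1) n 2
            PySem.Set.union (PySem.Set.ofList [p]) (pfBF fuel (PySem.Int.floordiv n p)))
        = PySem.Set.ofList (pfList n)
    by_cases h : n ≤ 1
    · rw [if_pos h]
      have : pfList n = [] := by unfold pfList; rw [if_neg (by omega)]
      rw [this]; rfl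
    · rw [if_neg h]
      have hn2 : 2 ≤ n := by omega
      have hNd : ((n.toNat : Int)) = n := Int.toNat_of_nonneg (by omega)
      have hp : spfBF (n.toNat + 1) n 2 = ((n.toNat.minFac : Nat) : Int) := by
        apply spfBF_spec (n.toNat + 1) n 2 (le_refl 2) hn2 (by omega)
        intro k hk hkd; omega
      have hp2 : (2:Nat) ≤ n.toNat.minFac := (Nat.minFac_prime (n := n.toNat) (by omega)).two_le
      have hdvdN : n.toNat.minFac ∣ n.toNat := Nat.minFac_dvd n.toNat
      have hfd : PySem.Int.floordiv n (spfBF (n.toNat + 1) n 2) = ((n.toNat / n.toNat.minFac : Nat) : Int) := by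
        rw [hp, ← hNd]
        exact PySem.Int.floordiv_natCast _ _
      have hpfl : pfList n = spfBF (n.toNat + 1) n 2 :: pfList (PySem.Int.floordiv n (spfBF (n.toNat + 1) n 2)) := by
        rw [hfd, pfList_natCast]
        unfold pfList
        rw [if_pos (by omega), pfl_unfold n.toNat (by omega), hp]
        simp
      have hrec : pfBF fuel (PySem.Int.floordiv n (spfBF (n.toNat + 1) n 2))
          = PySem.Set.ofList (pfList (PySem.Int.floordiv n (spfBF (n.toNat + 1) n 2))) := by
        apply ih
        rw [hfd]
        have h4 : n.toNat / n.toNat.minFac < n.toNat := Nat.div_lt_self (by omega) (by omega)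
        simp only [Int.toNat_natCast]
        omega
      simp only []
      rw [hrec, hpfl]
      show PySem.Set.update [spfBF (n.toNat + 1) n 2]
            (PySem.Set.ofList (pfList (PySem.Int.floordiv n (spfBF (n.toNat + 1) n 2))))
          = PySem.Set.ofList (spfBF (n.toNat + 1) n 2 :: pfList (PySem.Int.floordiv n (spfBF (n.toNat + 1) n 2)))
      rw [update_ofList, ofList_cons_eq_update]

theorem fold_eq (nums : List Int) (acc : PySem.Set Int) :
    nums.foldl (fun primes num => facAF (3 * num.toNat + 2) num 2 primes) acc
      = nums.foldl (fun primes num => PySem.Set.union primes (pfBF (num.toNat + 1) num)) acc := by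
  induction nums generalizing acc with
  | nil => rfl
  | cons x xs ih =>
    simp only [List.foldl_cons]
    rw [facAF_spec (3 * x.toNat + 2) x 2 acc (le_refl 2) (by omega) (by intro k hk hkd; omega)]
    rw [show PySem.Set.union acc (pfBF (x.toNat + 1) x) = PySem.Set.update acc (pfBF (x.toNat + 1) x) from rfl]
    rw [pfBF_spec (x.toNat + 1) x (by omega), update_ofList]
    exact ih _

-- ===== VERDICT (by name: the statement is the Claim_ definition above) =====
theorem distinctPrimeFactors_spec : Claim_equal_distinctPrimeFactors := by
  intro nums _
  unfold Spec_distinctPrimeFactors distinctPrimeFactors distinctPrimeFactors_alt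
  rw [fold_eq]
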